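-- pv_equiv track=rewrite | github.com/SimonaSfetcu/chipers-encryption-decryption | keyword_cipher.py | keyword_cipher
-- ===== SOURCE A (Python) =====
-- def keyword_cipher(text, key):
--     """
--     Encrypts the given text using the Keyword cipher with the provided key.
--
--     Parameters:
--         text (str): The text to be encrypted.
--         key (str): The encryption key.
--
--     Returns:
--         str: The encrypted text.
--     """
--     if not text or not key:
--         raise ValueError("Text and key must not be empty.")
--
--     result = ""
--     key_length = len(key)
--     key = key.upper()
--     for char in text:
--         if char.isalpha():
--             if char.isupper():
--                 result += chr((ord(char) - 65 + ord(key[(ord(char) - 65) % key_length]) - 65) % 26 + 65)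
--             else:
--                 result += chr((ord(char) - 97 + ord(key[(ord(char) - 97) % key_length]) - 97) % 26 + 97)
--         else:
--             result += char
--     return result
-- ===== SOURCE B (Python) =====
-- def keyword_cipher(text, key):
--     if not text or not key:
--         raise ValueError("Text and key must not be empty.")
--     k = key.upper()
--     n = len(key)
--     table = {}
--     for i in range(26):
--         s = ord(k[i % n])
--         table[chr(65 + i)] = chr((i + s - 65) % 26 + 65)
--         table[chr(97 + i)] = chr((i + s - 97) % 26 + 97)
--     return text.translate(str.maketrans(table))
-- ===== Notes on version B (the rewrite author's own statement) =====
-- stated objective: faster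
-- what changed: B precomputes a 52-entry substitution table from the key once and encrypts with a single str.maketrans/str.translate call, instead of A's per-character branch-and-arithmetic and string concatenation inside a Python loop.
import Mathlib
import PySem

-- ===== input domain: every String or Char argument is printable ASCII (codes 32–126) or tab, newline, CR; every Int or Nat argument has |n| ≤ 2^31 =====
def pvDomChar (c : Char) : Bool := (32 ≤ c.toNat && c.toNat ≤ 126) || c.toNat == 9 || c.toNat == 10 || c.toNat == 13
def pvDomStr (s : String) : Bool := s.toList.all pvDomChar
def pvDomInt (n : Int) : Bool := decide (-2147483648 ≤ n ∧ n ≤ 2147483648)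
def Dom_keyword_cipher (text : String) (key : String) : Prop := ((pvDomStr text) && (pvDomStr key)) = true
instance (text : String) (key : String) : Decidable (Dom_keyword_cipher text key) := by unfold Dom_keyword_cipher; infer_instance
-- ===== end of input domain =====

-- B replaces the per-character arithmetic of A's loop by a 52-entry translation
-- table built once from the key and a single str.translate pass (measured faster).

-- ===== PORT A =====
-- literal transliteration of A: running string accumulator, per-char branch arithmetic
def keyword_cipher (text : String) (key : String) : String :=
  let keyLength : Int := PySem.Str.len key
  let keyU : List Char := (PySem.Str.upper key).toList
  text.toList.foldl (fun result c =>
    if PySem.Chars.isalpha c then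
      if PySem.Chars.isupper c then
        match PySem.List.pyGet? keyU (PySem.Int.mod ((c.toNat : Int) - 65) keyLength) with
        | some kc =>
            result.push (Char.ofNat (PySem.Int.mod ((c.toNat : Int) - 65 + (kc.toNat : Int) - 65) 26 + 65).toNat)
        | none => result        -- IndexError: unreachable under Pre_ (key nonempty)
      else
        match PySem.List.pyGet? keyU (PySem.Int.mod ((c.toNat : Int) - 97) keyLength) with
        | some kc =>
            result.push (Char.ofNat (PySem.Int.mod ((c.toNat : Int) - 97 + (kc.toNat : Int) - 97) 26 + 97).toNat)
        | none => result        -- IndexError: unreachable under Pre_ (key nonempty)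
    else
      result.push c) ""

-- ===== PORT B =====
-- literal transliteration of Source B: build the dict over range(26), then translate
def keyword_cipher_alt (text : String) (key : String) : String :=
  let k : List Char := (PySem.Str.upper key).toList
  let n : Int := PySem.Str.len key
  let table : PySem.Dict Char Char :=
    (PySem.List.pyRange 0 26 1).foldl (fun d i =>
      match PySem.List.pyGet? k (PySem.Int.mod i n) with
      | some s =>
          (d.insert (Char.ofNat (65 + i).toNat)
              (Char.ofNat (PySem.Int.mod (i + (s.toNat : Int) - 65) 26 + 65).toNat)).insert
            (Char.ofNat (97 + i).toNat)
            (Char.ofNat (PySem.Int.mod (i + (s.toNat : Int) - 97) 26 + 97).toNat)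
      | none => d               -- IndexError: unreachable under Pre_ (key nonempty)
      ) PySem.Dict.empty
  -- text.translate(table): chars absent from the table are unchanged
  String.ofList (text.toList.map (fun c => table.getD c c))

-- ===== PRECONDITION & SPEC =====
-- Pre_ excludes exactly the inputs on which A raises ValueError: empty text or empty key.
def Pre_keyword_cipher (text : String) (key : String) : Prop := text ≠ "" ∧ key ≠ ""
instance (text : String) (key : String) : Decidable (Pre_keyword_cipher text key) := by
  unfold Pre_keyword_cipher; infer_instance
def pvWitness_keyword_cipher : String × String := ("Hi!", "key")

def Spec_keyword_cipher (text : String) (key : String) (out : String) : Prop := out = keyword_cipher_alt text key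
instance (text : String) (key : String) (out : String) : Decidable (Spec_keyword_cipher text key out) := by unfold Spec_keyword_cipher; infer_instance

-- ===== CLAIM (what is proved, stated in full; the proofs are below) =====
def Claim_equal_keyword_cipher : Prop := ∀ (text : String) (key : String), Dom_keyword_cipher text key → Pre_keyword_cipher text key → Spec_keyword_cipher text key (keyword_cipher text key)

-- ===== LEMMAS AND PROOFS =====

-- char-code toolbox
theorem pv_char_eq_iff (c d : Char) : c = d ↔ c.toNat = d.toNat :=
  ⟨fun h => h ▸ rfl, fun h => Char.ext (UInt32.toNat_inj.mp h)⟩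

theorem pv_toNat_ofNat (n : Nat) (h : n < 128) : (Char.ofNat n).toNat = n := by
  unfold Char.ofNat
  rw [dif_pos (by omega)]
  simp [Char.ofNatAux, Char.toNat]

theorem pv_isalpha_iff (c : Char) :
    PySem.Chars.isalpha c = true ↔ (65 ≤ c.toNat ∧ c.toNat ≤ 90) ∨ (97 ≤ c.toNat ∧ c.toNat ≤ 122) := by
  simp only [PySem.Chars.isalpha, PySem.Chars.isupper, PySem.Chars.islower, Bool.or_eq_true,
    Bool.and_eq_true, decide_eq_true_eq]
  exact Iff.rfl

theorem pv_isupper_iff (c : Char) :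
    PySem.Chars.isupper c = true ↔ (65 ≤ c.toNat ∧ c.toNat ≤ 90) := by
  simp only [PySem.Chars.isupper, Bool.and_eq_true, decide_eq_true_eq]
  exact Iff.rfl

-- the table-building step and partial table, mirroring keyword_cipher_alt's fold
def pvStep (key : String) (d : PySem.Dict Char Char) (i : Int) : PySem.Dict Char Char :=
  match PySem.List.pyGet? (PySem.Str.upper key).toList (PySem.Int.mod i (PySem.Str.len key)) with
  | some s =>
      (d.insert (Char.ofNat (65 + i).toNat)
          (Char.ofNat (PySem.Int.mod (i + (s.toNat : Int) - 65) 26 + 65).toNat)).insert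
        (Char.ofNat (97 + i).toNat)
        (Char.ofNat (PySem.Int.mod (i + (s.toNat : Int) - 97) 26 + 97).toNat)
  | none => d

def pvTable (key : String) (m : Nat) : PySem.Dict Char Char :=
  (PySem.List.pyRange 0 (m : Int) 1).foldl (pvStep key) PySem.Dict.empty

-- the per-character substitution A performs (branch values, with pyGet? kept)
def pvSub (key : String) (c : Char) : Char :=
  if 65 ≤ c.toNat ∧ c.toNat ≤ 90 then
    match PySem.List.pyGet? (PySem.Str.upper key).toList (PySem.Int.mod ((c.toNat : Int) - 65) (PySem.Str.len key)) with
    | some kc => Char.ofNat (PySem.Int.mod ((c.toNat : Int) - 65 + (kc.toNat : Int) - 65) 26 + 65).toNat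
    | none => c
  else if 97 ≤ c.toNat ∧ c.toNat ≤ 122 then
    match PySem.List.pyGet? (PySem.Str.upper key).toList (PySem.Int.mod ((c.toNat : Int) - 97) (PySem.Str.len key)) with
    | some kc => Char.ofNat (PySem.Int.mod ((c.toNat : Int) - 97 + (kc.toNat : Int) - 97) 26 + 97).toNat
    | none => c
  else c

theorem pv_table_getD (key : String) (m : Nat) (hm : m ≤ 26) (c : Char) :
    (pvTable key m).getD c c =
      if (65 ≤ c.toNat ∧ c.toNat < 65 + m) ∨ (97 ≤ c.toNat ∧ c.toNat < 97 + m) then pvSub key c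
      else c := by
  induction m with
  | zero =>
      rw [if_neg (by omega)]
      simp [pvTable, PySem.List.pyRange_one_eq_nil, PySem.Dict.getD_empty]
  | succ m ih =>
      have hm' : m ≤ 26 := by omega
      have hup : (65 + (m : Int)).toNat = 65 + m := by omega
      have hlow : (97 + (m : Int)).toNat = 97 + m := by omega
      have hupc : (Char.ofNat (65 + (m : Int)).toNat).toNat = 65 + m := by
        rw [hup]; exact pv_toNat_ofNat _ (by omega)
      have hlowc : (Char.ofNat (97 + (m : Int)).toNat).toNat = 97 + m := by
        rw [hlow]; exact pv_toNat_ofNat _ (by omega)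
      have hrange : PySem.List.pyRange 0 ((m + 1 : Nat) : Int) 1
          = PySem.List.pyRange 0 (m : Int) 1 ++ [(m : Int)] := by
        have : ((m + 1 : Nat) : Int) = (m : Int) + 1 := by push_cast; ring
        rw [this]; exact PySem.List.pyRange_one_succ_right (by positivity)
      rw [pvTable, hrange, List.foldl_append]
      have htab : (PySem.List.pyRange 0 (m : Int) 1).foldl (pvStep key) PySem.Dict.empty
          = pvTable key m := rfl
      rw [List.foldl_cons, List.foldl_nil, htab, pvStep]
      rcases h : PySem.List.pyGet? (PySem.Str.upper key).toList
          (PySem.Int.mod (m : Int) (PySem.Str.len key)) with _ | s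
      · -- IndexError branch: the step leaves the table unchanged; pvSub also sees none
        rw [ih (by omega)]
        by_cases hc1 : c.toNat = 65 + m
        · rw [if_neg (by omega), if_pos (by omega), pvSub, if_pos (by omega)]
          have hidx : ((c.toNat : Int) - 65) = (m : Int) := by omega
          rw [hidx, h]
        · by_cases hc2 : c.toNat = 97 + m
          · rw [if_neg (by omega), if_pos (by omega), pvSub, if_neg (by omega), if_pos (by omega)]
            have hidx : ((c.toNat : Int) - 97) = (m : Int) := by omega
            rw [hidx, h]
          · by_cases hc3 : (65 ≤ c.toNat ∧ c.toNat < 65 + m) ∨ (97 ≤ c.toNat ∧ c.toNat < 97 + m)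
            · rw [if_pos hc3, if_pos (by omega)]
            · rw [if_neg hc3, if_neg (by omega)]
      · rw [PySem.Dict.getD_insert, PySem.Dict.getD_insert]
        by_cases hc2 : c.toNat = 97 + m
        · rw [if_pos (by rw [pv_char_eq_iff, hlowc]; exact hc2), if_pos (by omega),
            pvSub, if_neg (by omega), if_pos (by omega)]
          have hidx : ((c.toNat : Int) - 97) = (m : Int) := by omega
          rw [hidx, h]
        · rw [if_neg (by rw [pv_char_eq_iff, hlowc]; exact hc2)]
          by_cases hc1 : c.toNat = 65 + m
          · rw [if_pos (by rw [pv_char_eq_iff, hupc]; exact hc1), if_pos (by omega),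
              pvSub, if_pos (by omega)]
            have hidx : ((c.toNat : Int) - 65) = (m : Int) := by omega
            rw [hidx, h]
          · rw [if_neg (by rw [pv_char_eq_iff, hupc]; exact hc1), ih (by omega)]
            by_cases hc3 : (65 ≤ c.toNat ∧ c.toNat < 65 + m) ∨ (97 ≤ c.toNat ∧ c.toNat < 97 + m)
            · rw [if_pos hc3, if_pos (by omega)]
            · rw [if_neg hc3, if_neg (by omega)]

theorem pv_getD_eq_sub (key : String) (c : Char) :
    (pvTable key 26).getD c c = pvSub key c := by
  rw [pv_table_getD key 26 (by omega) c]
  by_cases hc : (65 ≤ c.toNat ∧ c.toNat < 65 + 26) ∨ (97 ≤ c.toNat ∧ c.toNat < 97 + 26)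
  · rw [if_pos hc]
  · rw [if_neg hc, pvSub, if_neg (by omega), if_neg (by omega)]

theorem pv_key_some (key : String) (hk : key ≠ "") (i : Int) :
    ∃ kc, PySem.List.pyGet? (PySem.Str.upper key).toList
      (PySem.Int.mod i (PySem.Str.len key)) = some kc := by
  have hlen : ((PySem.Str.upper key).toList.length : Int) = PySem.Str.len key := by
    simp [PySem.Str.upper, PySem.Chars.upper, PySem.Str.len_eq]
  have hpos : (0 : Int) < PySem.Str.len key := by
    rw [PySem.Str.len_eq]
    have : key.toList ≠ [] := fun h => hk (String.toList_inj.mp h)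
    have : 0 < key.toList.length := List.length_pos_iff.mpr this
    omega
  have hmod : PySem.Int.mod i (PySem.Str.len key) = i % PySem.Str.len key :=
    PySem.Int.mod_eq_emod_of_pos hpos
  have h0 : 0 ≤ PySem.Int.mod i (PySem.Str.len key) := by
    rw [hmod]; exact Int.emod_nonneg i (by omega)
  have h1 : PySem.Int.mod i (PySem.Str.len key) < ((PySem.Str.upper key).toList.length : Int) := by
    rw [hmod, hlen]; exact Int.emod_lt_of_pos i hpos
  exact ⟨_, PySem.List.pyGet?_eq_some_getElem _ h0 h1⟩

theorem pv_step_push (key : String) (hk : key ≠ "") (s : String) (c : Char) :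
    (if PySem.Chars.isalpha c then
      if PySem.Chars.isupper c then
        match PySem.List.pyGet? (PySem.Str.upper key).toList (PySem.Int.mod ((c.toNat : Int) - 65) (PySem.Str.len key)) with
        | some kc =>
            s.push (Char.ofNat (PySem.Int.mod ((c.toNat : Int) - 65 + (kc.toNat : Int) - 65) 26 + 65).toNat)
        | none => s
      else
        match PySem.List.pyGet? (PySem.Str.upper key).toList (PySem.Int.mod ((c.toNat : Int) - 97) (PySem.Str.len key)) with
        | some kc =>
            s.push (Char.ofNat (PySem.Int.mod ((c.toNat : Int) - 97 + (kc.toNat : Int) - 97) 26 + 97).toNat)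
        | none => s
    else
      s.push c) = s.push (pvSub key c) := by
  by_cases hu : 65 ≤ c.toNat ∧ c.toNat ≤ 90
  · rw [if_pos ((pv_isalpha_iff c).mpr (Or.inl hu)), if_pos ((pv_isupper_iff c).mpr hu),
      pvSub, if_pos hu]
    obtain ⟨kc, h⟩ := pv_key_some key hk ((c.toNat : Int) - 65)
    rw [h]
  · by_cases hl : 97 ≤ c.toNat ∧ c.toNat ≤ 122
    · rw [if_pos ((pv_isalpha_iff c).mpr (Or.inr hl)),
        if_neg (fun h => by have := (pv_isupper_iff c).mp h; omega),
        pvSub, if_neg hu, if_pos hl]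
      obtain ⟨kc, h⟩ := pv_key_some key hk ((c.toNat : Int) - 97)
      rw [h]
    · rw [if_neg (fun h => by rcases (pv_isalpha_iff c).mp h with h | h <;> omega),
        pvSub, if_neg hu, if_neg hl]

theorem pv_foldl_eq (key : String) (hk : key ≠ "") (l : List Char) (s : String) :
    l.foldl (fun result c =>
      if PySem.Chars.isalpha c then
        if PySem.Chars.isupper c then
          match PySem.List.pyGet? (PySem.Str.upper key).toList (PySem.Int.mod ((c.toNat : Int) - 65) (PySem.Str.len key)) with
          | some kc =>
              result.push (Char.ofNat (PySem.Int.mod ((c.toNat : Int) - 65 + (kc.toNat : Int) - 65) 26 + 65).toNat)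
          | none => result
        else
          match PySem.List.pyGet? (PySem.Str.upper key).toList (PySem.Int.mod ((c.toNat : Int) - 97) (PySem.Str.len key)) with
          | some kc =>
              result.push (Char.ofNat (PySem.Int.mod ((c.toNat : Int) - 97 + (kc.toNat : Int) - 97) 26 + 97).toNat)
          | none => result
      else
        result.push c) s = s ++ String.ofList (l.map (pvSub key)) := by
  induction l generalizing s with
  | nil =>
      apply String.toList_inj.mp; simp
  | cons x xs ih =>
      rw [List.foldl_cons, pv_step_push key hk, ih]
      apply String.toList_inj.mp; simp

-- ===== VERDICT (by name: the statement is the Claim_ definition above) =====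
theorem keyword_cipher_spec : Claim_equal_keyword_cipher := by
  intro text key hdom hpre
  unfold Spec_keyword_cipher
  show keyword_cipher text key = keyword_cipher_alt text key
  have htab : keyword_cipher_alt text key
      = String.ofList (text.toList.map (fun c => (pvTable key 26).getD c c)) := rfl
  have ha : keyword_cipher text key
      = text.toList.foldl (fun result c =>
          if PySem.Chars.isalpha c then
            if PySem.Chars.isupper c then
              match PySem.List.pyGet? (PySem.Str.upper key).toList (PySem.Int.mod ((c.toNat : Int) - 65) (PySem.Str.len key)) with
              | some kc =>
                  result.push (Char.ofNat (PySem.Int.mod ((c.toNat : Int) - 65 + (kc.toNat : Int) - 65) 26 + 65).toNat)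
              | none => result
            else
              match PySem.List.pyGet? (PySem.Str.upper key).toList (PySem.Int.mod ((c.toNat : Int) - 97) (PySem.Str.len key)) with
              | some kc =>
                  result.push (Char.ofNat (PySem.Int.mod ((c.toNat : Int) - 97 + (kc.toNat : Int) - 97) 26 + 97).toNat)
              | none => result
          else
            result.push c) "" := rfl
  rw [ha, htab, pv_foldl_eq key hpre.2]
  have : (text.toList.map (fun c => (pvTable key 26).getD c c))
      = text.toList.map (pvSub key) := List.map_congr_left (fun c _ => pv_getD_eq_sub key c)
  rw [this]
  apply String.toList_inj.mp; simp
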